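-- pv_equiv track=rewrite | github.com/ajmarcus/byewords | src/byewords/prefixes.py | build_prefix_index
-- ===== SOURCE A (Python) =====
-- def build_prefix_index(words: tuple[str, ...]) -> dict[str, tuple[str, ...]]:
--     buckets: dict[str, list[str]] = {"": []}
--     for word in words:
--         normalized = word.lower()
--         buckets[""].append(normalized)
--         for prefix_length in range(1, len(normalized) + 1):
--             prefix = normalized[:prefix_length]
--             buckets.setdefault(prefix, []).append(normalized)
--     return {
--         prefix: tuple(sorted(dict.fromkeys(matches)))
--         for prefix, matches in buckets.items()
--     }
-- ===== SOURCE B (Python) =====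
-- def build_prefix_index(words):
--     # distinct normalized words, in first-occurrence order
--     distinct = list(dict.fromkeys(w.lower() for w in words))
--     # pass 1: every prefix key, in first-occurrence order (a duplicate word
--     # adds no new prefix, so scanning distinct words gives the same order)
--     order = [""]
--     seen = {""}
--     for w in distinct:
--         for i in range(1, len(w) + 1):
--             p = w[:i]
--             if p not in seen:
--                 seen.add(p)
--                 order.append(p)
--     # pass 2: fill buckets from the distinct words sorted once, so every
--     # bucket comes out already sorted and duplicate-free
--     buckets = {p: [] for p in order}
--     for w in sorted(distinct):
--         buckets[""].append(w)
--         for i in range(1, len(w) + 1):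
--             buckets[w[:i]].append(w)
--     return {p: tuple(buckets[p]) for p in order}
-- ===== Notes on version B (the rewrite author's own statement) =====
-- stated objective: faster
-- what changed: Instead of appending every occurrence of every word to every prefix bucket and then sorting+deduplicating each bucket separately, B deduplicates the lowered words once, records the prefix keys in first-occurrence order in one pass over the distinct words, and fills the buckets from the distinct words sorted once, so every bucket comes out already sorted and duplicate-free with no per-bucket sort.
import Mathlib
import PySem

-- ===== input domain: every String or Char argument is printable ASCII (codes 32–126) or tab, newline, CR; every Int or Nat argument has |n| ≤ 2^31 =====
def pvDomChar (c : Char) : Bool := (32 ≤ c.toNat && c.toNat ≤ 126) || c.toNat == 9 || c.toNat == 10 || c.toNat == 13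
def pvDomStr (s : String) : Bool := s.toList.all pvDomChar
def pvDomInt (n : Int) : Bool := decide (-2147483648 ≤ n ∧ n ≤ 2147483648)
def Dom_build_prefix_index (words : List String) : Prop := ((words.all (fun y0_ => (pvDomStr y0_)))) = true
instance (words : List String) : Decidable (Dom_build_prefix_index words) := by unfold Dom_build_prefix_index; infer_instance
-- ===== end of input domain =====

-- B builds each bucket pre-sorted and deduplicated by sorting the distinct words once,
-- instead of sorting and deduplicating every bucket separately (objective: faster — one sort of the distinct words replaces all per-bucket sorts).


-- ===== PORT A =====
-- for word in words: append word.lower() to buckets[""] and to buckets.setdefault(prefix, []) for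
-- every nonempty prefix; finally sort and dedup every bucket (setdefault-append = Dict.modify _ []).
def build_prefix_index (words : List String) : List (String × List String) :=
  let buckets :=
    words.foldl
      (fun buckets word =>
        let normalized := PySem.Str.lower word
        let buckets := buckets.modify "" [] (· ++ [normalized])
        (PySem.List.pyRange 1 (PySem.Str.len normalized + 1)).foldl
          (fun buckets prefix_length =>
            buckets.modify (PySem.Str.slice normalized none (some prefix_length)) []
              (· ++ [normalized]))
          buckets)
      (PySem.Dict.ofList [("", ([] : List String))])
  buckets.items.map (fun kv => (kv.1, PySem.List.sorted (PySem.List.dedup kv.2) (fun x => x)))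

-- ===== PORT B =====
-- pass 1: every prefix key in first-occurrence order over the distinct lowered words
-- (the Python's `seen` set + `order` list is exactly PySem.Set.add on an insertion-ordered set);
-- pass 2: fill the pre-created buckets from the distinct words sorted once.
def build_prefix_index_alt (words : List String) : List (String × List String) :=
  let distinct := PySem.List.dedup (words.map PySem.Str.lower)
  let order :=
    distinct.foldl
      (fun order w =>
        (PySem.List.pyRange 1 (PySem.Str.len w + 1)).foldl
          (fun order i => PySem.Set.add order (PySem.Str.slice w none (some i)))
          order)
      (PySem.Set.ofList [""])
  let buckets0 := order.foldl (fun d p => d.insert p ([] : List String)) PySem.Dict.empty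
  let buckets :=
    (PySem.List.sorted distinct (fun x => x)).foldl
      (fun d w =>
        let d := d.modify "" [] (· ++ [w])
        (PySem.List.pyRange 1 (PySem.Str.len w + 1)).foldl
          (fun d i => d.modify (PySem.Str.slice w none (some i)) [] (· ++ [w]))
          d)
      buckets0
  order.map (fun p => (p, buckets.getD p []))

-- ===== PRECONDITION & SPEC =====
def Spec_build_prefix_index (words : List String) (out : List (String × List String)) : Prop := out = build_prefix_index_alt words
instance (words : List String) (out : List (String × List String)) : Decidable (Spec_build_prefix_index words out) := by unfold Spec_build_prefix_index; infer_instance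

-- ===== CLAIM (what is proved, stated in full; the proofs are below) =====
def Claim_equal_build_prefix_index : Prop := ∀ (words : List String), Dom_build_prefix_index words → Spec_build_prefix_index words (build_prefix_index words)

-- ===== LEMMAS AND PROOFS =====

-- the nonempty prefixes of a word, and the keys a word touches
def pvPfx (v : String) : List String :=
  (PySem.List.pyRange 1 (PySem.Str.len v + 1)).map
    (fun i => PySem.Str.slice v none (some i))

def pvKeys (v : String) : List String := "" :: pvPfx v

-- the (shared) per-word bucket update both Pythons contain
def pvStep (d : PySem.Dict String (List String)) (v : String) : PySem.Dict String (List String) :=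
  (PySem.List.pyRange 1 (PySem.Str.len v + 1)).foldl
    (fun d i => d.modify (PySem.Str.slice v none (some i)) [] (· ++ [v]))
    (d.modify "" [] (· ++ [v]))

-- the per-word key-set update
def pvG (s : PySem.Set String) (v : String) : PySem.Set String :=
  PySem.Set.update s (pvPfx v)


lemma pvPyRange_pairwise (a b : Int) : (PySem.List.pyRange a b).Pairwise (· < ·) := by
  by_cases h : a < b
  · rw [PySem.List.pyRange_one_cons h]
    constructor
    · intro x hx
      have hb := PySem.List.mem_pyRange_one.mp hx
      omega
    · exact pvPyRange_pairwise (a + 1) b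
  · have hnil : PySem.List.pyRange a b = [] :=
      List.eq_nil_iff_forall_not_mem.mpr (fun x hx => by have := PySem.List.mem_pyRange_one.mp hx; omega)
    rw [hnil]
    exact List.Pairwise.nil
termination_by (b - a).toNat
decreasing_by omega

lemma pvPfx_toList {v p : String} (h : p ∈ pvPfx v) :
    ∃ i : Int, 1 ≤ i ∧ i ≤ PySem.Str.len v ∧ p.toList = v.toList.take i.toNat := by
  unfold pvPfx at h
  rcases List.mem_map.mp h with ⟨i, hi, rfl⟩
  have hb := PySem.List.mem_pyRange_one.mp hi
  refine ⟨i, by omega, by omega, ?_⟩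
  rw [PySem.Str.toList_slice, PySem.Chars.slice_eq_listSlice,
    PySem.List.slice_to v.toList (show (0:Int) ≤ i by omega)]

lemma pvLen_eq (v : String) : PySem.Str.len v = (v.toList.length : Int) := by
  simp [PySem.Str.len]

lemma pvPfx_ne_empty {v p : String} (h : p ∈ pvPfx v) : p ≠ "" := by
  rcases pvPfx_toList h with ⟨i, h1, h2, h3⟩
  rw [pvLen_eq] at h2
  intro hc
  have hnil : v.toList.take i.toNat = [] := by
    rw [← h3, hc]; rfl
  rcases List.take_eq_nil_iff.mp hnil with h4 | h4
  · omega
  · rw [h4] at h2; simp at h2; omega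

lemma pvPfx_nodup (v : String) : (pvPfx v).Nodup := by
  unfold pvPfx
  apply List.Nodup.map_on
  · intro i hi j hj hij
    have hbi := PySem.List.mem_pyRange_one.mp hi
    have hbj := PySem.List.mem_pyRange_one.mp hj
    have h1 : (PySem.Str.slice v none (some i)).toList = v.toList.take i.toNat := by
      rw [PySem.Str.toList_slice, PySem.Chars.slice_eq_listSlice,
        PySem.List.slice_to v.toList (show (0:Int) ≤ i by omega)]
    have h2 : (PySem.Str.slice v none (some j)).toList = v.toList.take j.toNat := by
      rw [PySem.Str.toList_slice, PySem.Chars.slice_eq_listSlice,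
        PySem.List.slice_to v.toList (show (0:Int) ≤ j by omega)]
    have hL := pvLen_eq v
    have h3 := congrArg (fun s => s.toList.length) hij
    simp only [h1, h2, List.length_take] at h3
    omega
  · exact ((pvPyRange_pairwise _ _).imp (fun h => ne_of_lt h))

lemma pvFilter_nodup_eq {l : List String} (hnd : l.Nodup) (p : String) :
    l.filter (· == p) = if p ∈ l then [p] else [] := by
  induction l with
  | nil => simp
  | cons x t ih =>
    rcases List.nodup_cons.mp hnd with ⟨hx, ht⟩
    rw [List.filter_cons]
    by_cases hxp : x = p
    · subst hxp
      have hnt : t.filter (· == x) = [] := by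
        apply List.filter_eq_nil_iff.mpr
        intro y hy
        simp only [beq_iff_eq]
        intro hc; exact hx (hc ▸ hy)
      simp [hnt]
    · have hb : (x == p) = false := by simp [hxp]
      rw [hb, ih ht]
      have hpx : ¬ p = x := fun h => hxp h.symm
      simp [List.mem_cons, hpx]

lemma pvSet_add_of_mem {s : PySem.Set String} {x : String} (h : x ∈ s) : s.add x = s := by
  unfold PySem.Set.add
  rw [if_pos ((PySem.Set.contains_iff s x).mpr h)]

lemma pvSet_add_of_not_mem {s : PySem.Set String} {x : String} (h : x ∉ s) : s.add x = s ++ [x] := by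
  unfold PySem.Set.add
  rw [if_neg (fun hc => h ((PySem.Set.contains_iff s x).mp hc))]

lemma pvSet_update_eq_foldl (s : PySem.Set String) (l : List String) :
    PySem.Set.update s l = l.foldl PySem.Set.add s := rfl

lemma pvSet_update_of_subset {s : PySem.Set String} {l : List String} (h : ∀ x ∈ l, x ∈ s) :
    PySem.Set.update s l = s := by
  induction l generalizing s with
  | nil => rfl
  | cons x t ih =>
    rw [pvSet_update_eq_foldl, List.foldl_cons, pvSet_add_of_mem (h x (by simp)),
      ← pvSet_update_eq_foldl]
    exact ih (fun y hy => h y (by simp [hy]))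

lemma pvMem_pvG {s : PySem.Set String} {x : String} (h : x ∈ s) (v : String) : x ∈ pvG s v := by
  unfold pvG
  exact (PySem.Set.mem_update s (pvPfx v) x).mpr (Or.inl h)

lemma pvStep_keys (d : PySem.Dict String (List String)) (v : String) (h : "" ∈ d.keys) :
    (pvStep d v).keys = pvG d.keys v := by
  have hk := PySem.Dict.keys_foldl_modify_key (PySem.List.pyRange 1 (PySem.Str.len v + 1))
    (fun i => PySem.Str.slice v none (some i)) ([] : List String)
    (fun _ _ w => w ++ [v]) (d.modify "" [] (· ++ [v]))
  have hmods : (d.modify "" [] (· ++ [v])).keys = d.keys := by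
    rw [PySem.Dict.keys_modify]
    exact PySem.Dict.keys_insert_of_contains d _ ((PySem.Dict.contains_iff_mem_keys d "").mpr h)
  unfold pvStep pvG pvPfx
  exact hk.trans (by rw [hmods])

lemma pvFold_keys (ns : List String) (d : PySem.Dict String (List String)) (h : "" ∈ d.keys) :
    (ns.foldl pvStep d).keys = ns.foldl pvG d.keys := by
  induction ns generalizing d with
  | nil => rfl
  | cons v t ih =>
    rw [List.foldl_cons, List.foldl_cons,
      ih (pvStep d v) (by rw [pvStep_keys d v h]; exact pvMem_pvG h v), pvStep_keys d v h]

lemma pvFoldG_filter (x : String) :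
    ∀ (l : List String) (s : PySem.Set String), (∀ p ∈ pvPfx x, p ∈ s) →
      l.foldl pvG s = (l.filter (fun y => y != x)).foldl pvG s := by
  intro l
  induction l with
  | nil => intro s _; rfl
  | cons y t ih =>
    intro s h
    rw [List.filter_cons]
    by_cases hyx : y = x
    · subst hyx
      rw [if_neg (by simp)]
      rw [List.foldl_cons]
      have hGy : pvG s y = s := pvSet_update_of_subset h
      rw [hGy]
      exact ih s h
    · rw [if_pos (by simp [hyx]), List.foldl_cons, List.foldl_cons]
      exact ih (pvG s y) (fun p hp => pvMem_pvG (h p hp) y)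

lemma pvFoldAdd_filter (x : String) :
    ∀ (l : List String) (s : PySem.Set String), x ∈ s →
      l.foldl PySem.Set.add s = (l.filter (fun y => y != x)).foldl PySem.Set.add s := by
  intro l
  induction l with
  | nil => intro s _; rfl
  | cons y t ih =>
    intro s h
    rw [List.filter_cons]
    by_cases hyx : y = x
    · subst hyx
      rw [if_neg (by simp), List.foldl_cons, pvSet_add_of_mem h]
      exact ih s h
    · rw [if_pos (by simp [hyx]), List.foldl_cons, List.foldl_cons]
      exact ih (PySem.Set.add s y) ((PySem.Set.mem_add s y x).mpr (Or.inl h))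

lemma pvFoldAdd_cons (x : String) :
    ∀ (m : List String) (s : PySem.Set String), (∀ y ∈ m, y ≠ x) →
      m.foldl PySem.Set.add (x :: s) = x :: m.foldl PySem.Set.add s := by
  intro m
  induction m with
  | nil => intro s _; rfl
  | cons y t ih =>
    intro s h
    have hyx : y ≠ x := h y (by simp)
    rw [List.foldl_cons, List.foldl_cons]
    by_cases hm : y ∈ s
    · rw [pvSet_add_of_mem hm, pvSet_add_of_mem (List.mem_cons_of_mem x hm)]
      exact ih s (fun z hz => h z (by simp [hz]))
    · have h1 : PySem.Set.add (x :: s) y = x :: (s ++ [y]) := by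
        rw [pvSet_add_of_not_mem (by simp [hyx, hm])]
        rfl
      rw [h1, pvSet_add_of_not_mem hm]
      exact ih (s ++ [y]) (fun z hz => h z (by simp [hz]))

lemma pvOfList_cons (x : String) (l : List String) :
    PySem.Set.ofList (x :: l) = x :: PySem.Set.ofList (l.filter (fun y => y != x)) := by
  rw [PySem.Set.ofList_eq_foldl, PySem.Set.ofList_eq_foldl, List.foldl_cons]
  have h0 : PySem.Set.add ([] : PySem.Set String) x = [x] := pvSet_add_of_not_mem (by simp)
  rw [h0, pvFoldAdd_filter x l [x] (by simp)]
  have h1 : ([x] : PySem.Set String) = x :: ([] : PySem.Set String) := rfl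
  rw [h1, pvFoldAdd_cons x _ [] (fun y hy => by simpa using (List.of_mem_filter hy))]

lemma pvFoldG_dedup :
    ∀ (n : Nat) (ns : List String), ns.length ≤ n → ∀ s : PySem.Set String,
      ns.foldl pvG s = (PySem.List.dedup ns).foldl pvG s := by
  intro n
  induction n with
  | zero =>
    intro ns h s
    rw [List.eq_nil_of_length_eq_zero (Nat.le_zero.mp h)]
    rfl
  | succ n ih =>
    intro ns h s
    cases ns with
    | nil => rfl
    | cons x t =>
      rw [PySem.List.dedup_eq_ofList, pvOfList_cons, List.foldl_cons, List.foldl_cons]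
      have hsub : ∀ p ∈ pvPfx x, p ∈ pvG s x :=
        fun p hp => (PySem.Set.mem_update s (pvPfx x) p).mpr (Or.inr hp)
      rw [pvFoldG_filter x t (pvG s x) hsub]
      have hlen : (t.filter (fun y => y != x)).length ≤ n :=
        le_trans (List.length_filter_le _ _) (by simpa using h)
      rw [ih (t.filter (fun y => y != x)) hlen (pvG s x), PySem.List.dedup_eq_ofList]

lemma pvNodup_update (s : PySem.Set String) (l : List String) (h : s.Nodup) :
    (PySem.Set.update s l).Nodup := by
  induction l generalizing s with
  | nil => exact h
  | cons x t ih =>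
    rw [pvSet_update_eq_foldl, List.foldl_cons, ← pvSet_update_eq_foldl]
    exact ih _ (PySem.Set.nodup_add s x h)

lemma pvNodup_foldG (ns : List String) (s : PySem.Set String) (h : s.Nodup) :
    (ns.foldl pvG s).Nodup := by
  induction ns generalizing s with
  | nil => exact h
  | cons x t ih => exact ih _ (pvNodup_update s (pvPfx x) h)

lemma pvFoldInsert_getD :
    ∀ (l : List String) (d : PySem.Dict String (List String)),
      (∀ p, d.getD p [] = []) → ∀ p,
      (l.foldl (fun d k => d.insert k ([] : List String)) d).getD p [] = [] := by
  intro l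
  induction l with
  | nil => intro d h p; exact h p
  | cons x t ih =>
    intro d h p
    rw [List.foldl_cons]
    apply ih
    intro q
    rw [PySem.Dict.getD_insert]
    split
    · rfl
    · exact h q

lemma pvPairFilter (L : List String) (v p : String) :
    ((L.map (fun q => (q, v))).filter (fun r => r.1 == p)).map (fun r => r.2) =
      (L.filter (· == p)).map (fun _ => v) := by
  induction L with
  | nil => rfl
  | cons q t ih =>
    simp only [List.map_cons, List.filter_cons]
    by_cases h : q = p
    · subst h
      simp only [beq_self_eq_true, if_pos, List.map_cons]
      rw [ih]
    · have hb : (q == p) = false := by simp [h]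
      simp only [hb]
      simpa using ih

lemma pvStep_getD (d : PySem.Dict String (List String)) (v p : String) :
    (pvStep d v).getD p [] = d.getD p [] ++ (if p ∈ pvKeys v then [v] else []) := by
  have hL : (PySem.List.pyRange 1 (PySem.Str.len v + 1)).map
      (fun i => (PySem.Str.slice v none (some i), v)) = (pvPfx v).map (fun q => (q, v)) := by
    unfold pvPfx
    rw [List.map_map]
    rfl
  have h := PySem.Dict.getD_foldl_modify_append
    ((PySem.List.pyRange 1 (PySem.Str.len v + 1)).map
      (fun i => (PySem.Str.slice v none (some i), v)))
    (d.modify "" [] (· ++ [v])) p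
  rw [List.foldl_map] at h
  rw [hL] at h
  have hrest : (d.modify "" [] (· ++ [v])).getD p [] ++
      (((pvPfx v).map (fun q => (q, v))).filter (fun r => r.1 == p)).map (fun r => r.2) =
      d.getD p [] ++ (if p ∈ pvKeys v then [v] else []) := by
    rw [pvPairFilter]
    by_cases hp : p = ""
    · subst hp
      rw [PySem.Dict.getD_modify, if_pos rfl]
      have hf : (pvPfx v).filter (· == "") = [] :=
        List.filter_eq_nil_iff.mpr (fun q hq => by simpa using pvPfx_ne_empty hq)
      rw [hf]
      have hm : ("" : String) ∈ pvKeys v := by unfold pvKeys; simp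
      rw [if_pos hm]
      simp
    · rw [PySem.Dict.getD_modify, if_neg hp, pvFilter_nodup_eq (pvPfx_nodup v) p]
      have hk : (p ∈ pvKeys v) ↔ p ∈ pvPfx v := by unfold pvKeys; simp [hp]
      by_cases hm : p ∈ pvPfx v
      · rw [if_pos hm, if_pos (hk.mpr hm)]
        rfl
      · rw [if_neg hm, if_neg (fun hc => hm (hk.mp hc))]
        rfl
  exact h.trans hrest

lemma pvFold_getD (ns : List String) (d : PySem.Dict String (List String)) (p : String) :
    (ns.foldl pvStep d).getD p [] =
      d.getD p [] ++ ns.filter (fun v => decide (p ∈ pvKeys v)) := by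
  induction ns generalizing d with
  | nil => simp
  | cons v t ih =>
    rw [List.foldl_cons, ih, pvStep_getD, List.filter_cons]
    by_cases hm : p ∈ pvKeys v
    · simp [hm, List.append_assoc]
    · simp [hm]

lemma pvSortFilter (ns : List String) (q : String → Bool) :
    PySem.List.sorted (PySem.List.dedup (ns.filter q)) (fun x => x) =
      (PySem.List.sorted (PySem.List.dedup ns) (fun x => x)).filter q := by
  apply PySem.List.sorted_eq_of_perm_of_pairwise_lt
  · have h1 : ((PySem.List.sorted (PySem.List.dedup ns) (fun x => x)).filter q).Perm
        ((PySem.List.dedup ns).filter q) :=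
      (PySem.List.sorted_perm (PySem.List.dedup ns) (fun x => x) false).filter q
    have h2 : ((PySem.List.dedup ns).filter q).Perm (PySem.List.dedup (ns.filter q)) := by
      rw [List.perm_ext_iff_of_nodup ((PySem.List.nodup_dedup ns).filter q)
        (PySem.List.nodup_dedup (ns.filter q))]
      intro a
      simp [List.mem_filter]
    exact h1.trans h2
  · have h3 := PySem.List.sorted_ofList_pairwise_lt ns
    rw [← PySem.List.dedup_eq_ofList] at h3
    exact h3.filter q

lemma pvOrdLam_eq :
    (fun (ord : PySem.Set String) (w : String) =>
      (PySem.List.pyRange 1 (PySem.Str.len w + 1)).foldl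
        (fun ord i => PySem.Set.add ord (PySem.Str.slice w none (some i))) ord) = pvG := by
  funext s w
  unfold pvG pvPfx
  rw [pvSet_update_eq_foldl, List.foldl_map]

lemma pvOfList_single : PySem.Set.ofList [""] = ([""] : PySem.Set String) := rfl

lemma pvA_eq (words : List String) :
    build_prefix_index words =
      ((words.map PySem.Str.lower).foldl pvStep
        (PySem.Dict.ofList [("", ([] : List String))])).items.map
        (fun kv => (kv.1, PySem.List.sorted (PySem.List.dedup kv.2) (fun x => x))) := by
  unfold build_prefix_index
  rw [List.foldl_map]
  rfl

lemma pvB_eq (words : List String) :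
    build_prefix_index_alt words =
      ((PySem.List.dedup (words.map PySem.Str.lower)).foldl pvG ([""] : PySem.Set String)).map
        (fun p => (p,
          ((PySem.List.sorted (PySem.List.dedup (words.map PySem.Str.lower)) (fun x => x)).foldl
            pvStep
            (((PySem.List.dedup (words.map PySem.Str.lower)).foldl pvG
                ([""] : PySem.Set String)).foldl
              (fun d k => d.insert k ([] : List String)) PySem.Dict.empty)).getD p [])) := by
  unfold build_prefix_index_alt
  simp only [pvOrdLam_eq, pvOfList_single]
  rfl

lemma pvDinit_keys : (PySem.Dict.ofList [("", ([] : List String))]).keys = [""] := rfl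

lemma pvDinit_getD (k : String) :
    (PySem.Dict.ofList [("", ([] : List String))]).getD k [] = [] := by
  have h : PySem.Dict.ofList [("", ([] : List String))] =
      (PySem.Dict.empty : PySem.Dict String (List String)).insert "" [] := rfl
  rw [h, PySem.Dict.getD_insert]
  split
  · rfl
  · rw [PySem.Dict.getD_empty]

theorem build_prefix_index_spec_aux (words : List String) :
    build_prefix_index words = build_prefix_index_alt words := by
  rw [pvA_eq, pvB_eq]
  have hmem0 : "" ∈ (PySem.Dict.ofList [("", ([] : List String))]).keys := by
    rw [pvDinit_keys]; simp
  have hK : ((words.map PySem.Str.lower).foldl pvStep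
      (PySem.Dict.ofList [("", ([] : List String))])).keys =
      (PySem.List.dedup (words.map PySem.Str.lower)).foldl pvG ([""] : PySem.Set String) := by
    rw [pvFold_keys _ _ hmem0, pvDinit_keys]
    exact pvFoldG_dedup (words.map PySem.Str.lower).length _ le_rfl _
  have hnodup : (((words.map PySem.Str.lower)).foldl pvStep
      (PySem.Dict.ofList [("", ([] : List String))])).keys.Nodup := by
    rw [hK]
    exact pvNodup_foldG _ _ (by simp)
  rw [PySem.Dict.items_eq_map_keys _ hnodup ([] : List String), List.map_map, hK]
  apply List.map_congr_left
  intro k _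
  simp only [Function.comp_apply]
  refine congrArg (fun z => (k, z)) ?_
  rw [pvFold_getD, pvDinit_getD k, List.nil_append,
    pvFold_getD, pvFoldInsert_getD _ _ (fun p => PySem.Dict.getD_empty p []) k, List.nil_append,
    pvSortFilter]

-- ===== VERDICT (by name: the statement is the Claim_ definition above) =====
theorem build_prefix_index_spec : Claim_equal_build_prefix_index := by
  intro words _
  unfold Spec_build_prefix_index
  exact build_prefix_index_spec_aux words
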